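-- pv_equiv track=rewrite | github.com/aichingert/aoc | 2016/python/02.py | part2
-- ===== SOURCE A (Python) =====
-- S = [['0','0','1','0','0'],['0','2','3','4','0'],['5','6','7','8','9'],['0','A','B','C','0'],['0','0','D','0','0']]
--
-- def part2(inp):
--     ans = ""
--     loc = [0,2]
--
--     for i in range(len(inp)):
--         for j in range(len(inp[i])):
--             match inp[i][j]:
--                 case 'U':
--                     if loc[1]>0 and S[loc[1]-1][loc[0]] != '0': loc[1] -= 1
--                 case 'L':
--                     if loc[0]>0 and S[loc[1]][loc[0]-1] != '0': loc[0] -= 1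
--                 case 'R':
--                     if loc[0]+1<len(S) and S[loc[1]][loc[0]+1] != '0': loc[0] += 1
--                 case 'D':
--                     if loc[1]+1<len(S) and S[loc[1]+1][loc[0]] != '0': loc[1] += 1
--         ans += str(S[loc[1]][loc[0]])
--     return ans
-- ===== SOURCE B (Python) =====
-- # Precomputed transition table for the diamond keypad: for each key, the key
-- # reached by each of 'U','L','R','D'; a move off the pad is simply absent and
-- # leaves the key unchanged. Replaces all coordinate arithmetic with lookups.
-- TRANS = {
--     '1': {'D': '3'},
--     '2': {'R': '3', 'D': '6'},
--     '3': {'U': '1', 'L': '2', 'R': '4', 'D': '7'},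
--     '4': {'L': '3', 'D': '8'},
--     '5': {'R': '6'},
--     '6': {'U': '2', 'L': '5', 'R': '7', 'D': 'A'},
--     '7': {'U': '3', 'L': '6', 'R': '8', 'D': 'B'},
--     '8': {'U': '4', 'L': '7', 'R': '9', 'D': 'C'},
--     '9': {'L': '8'},
--     'A': {'U': '6', 'R': 'B'},
--     'B': {'U': '7', 'L': 'A', 'R': 'C', 'D': 'D'},
--     'C': {'U': '8', 'L': 'B'},
--     'D': {'U': 'B'},
-- }
--
-- def part2(inp):
--     ans = ""
--     cur = '5'
--     for line in inp:
--         for ch in line: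
--             cur = TRANS[cur].get(ch, cur)
--         ans += cur
--     return ans
-- ===== Notes on version B (the rewrite author's own statement) =====
-- stated objective: simpler
-- what changed: Replaces the 5x5 grid with per-move coordinate arithmetic and bounds/sentinel checks by a precomputed key-to-key transition table walked by dictionary lookups.
import Mathlib
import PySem

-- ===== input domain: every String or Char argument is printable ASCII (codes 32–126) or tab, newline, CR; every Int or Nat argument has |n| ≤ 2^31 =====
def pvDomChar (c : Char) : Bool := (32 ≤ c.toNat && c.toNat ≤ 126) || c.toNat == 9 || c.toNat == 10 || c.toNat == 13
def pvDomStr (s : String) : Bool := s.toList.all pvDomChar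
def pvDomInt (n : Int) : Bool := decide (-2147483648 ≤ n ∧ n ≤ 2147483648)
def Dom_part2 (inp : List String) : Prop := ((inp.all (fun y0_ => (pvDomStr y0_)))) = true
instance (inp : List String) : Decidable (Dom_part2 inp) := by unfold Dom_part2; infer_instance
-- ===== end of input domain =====

-- B replaces A's 5x5 grid, coordinate arithmetic and bounds/sentinel checks by a
-- precomputed key-to-key transition table walked by dictionary lookups (same cost).


-- ===== PORT A =====
def pvS : List (List String) :=
  [["0","0","1","0","0"],["0","2","3","4","0"],["5","6","7","8","9"],
   ["0","A","B","C","0"],["0","0","D","0","0"]]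

-- S[y][x]; exact on every access A performs: A's guards keep both indices in 0..4,
-- so the defaulted lookup never falls back to its default.
def pvAt (x y : Int) : String :=
  ((PySem.List.pyGet? pvS y).bind (fun r => PySem.List.pyGet? r x)).getD "0"

-- one character of A's inner loop (loc = (x, y))
def pvStepA (st : Int × Int) (c : Char) : Int × Int :=
  if c = 'U' then (if st.2 > 0 ∧ pvAt st.1 (st.2 - 1) ≠ "0" then (st.1, st.2 - 1) else st)
  else if c = 'L' then (if st.1 > 0 ∧ pvAt (st.1 - 1) st.2 ≠ "0" then (st.1 - 1, st.2) else st)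
  else if c = 'R' then (if st.1 + 1 < 5 ∧ pvAt (st.1 + 1) st.2 ≠ "0" then (st.1 + 1, st.2) else st)
  else if c = 'D' then (if st.2 + 1 < 5 ∧ pvAt st.1 (st.2 + 1) ≠ "0" then (st.1, st.2 + 1) else st)
  else st

def part2 (inp : List String) : String :=
  (inp.foldl (fun acc line =>
      let st := line.toList.foldl pvStepA acc.2
      (acc.1 ++ pvAt st.1 st.2, st)) ("", ((0 : Int), (2 : Int)))).1

-- ===== PORT B =====
def pvTrans : PySem.Dict Char (PySem.Dict Char Char) := PySem.Dict.mk
  [ ('1', PySem.Dict.mk [('D','3')]),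
    ('2', PySem.Dict.mk [('R','3'),('D','6')]),
    ('3', PySem.Dict.mk [('U','1'),('L','2'),('R','4'),('D','7')]),
    ('4', PySem.Dict.mk [('L','3'),('D','8')]),
    ('5', PySem.Dict.mk [('R','6')]),
    ('6', PySem.Dict.mk [('U','2'),('L','5'),('R','7'),('D','A')]),
    ('7', PySem.Dict.mk [('U','3'),('L','6'),('R','8'),('D','B')]),
    ('8', PySem.Dict.mk [('U','4'),('L','7'),('R','9'),('D','C')]),
    ('9', PySem.Dict.mk [('L','8')]),
    ('A', PySem.Dict.mk [('U','6'),('R','B')]),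
    ('B', PySem.Dict.mk [('U','7'),('L','A'),('R','C'),('D','D')]),
    ('C', PySem.Dict.mk [('U','8'),('L','B')]),
    ('D', PySem.Dict.mk [('U','B')]) ]

-- TRANS[cur].get(ch, cur); cur is always one of the 13 keys, so the outer
-- defaulted lookup (Python's raising TRANS[cur]) never misses.
def pvStepB (cur ch : Char) : Char :=
  (((PySem.Dict.get? pvTrans cur).getD PySem.Dict.empty).get? ch).getD cur

def part2_alt (inp : List String) : String :=
  (inp.foldl (fun acc line =>
      let c := line.toList.foldl pvStepB acc.2
      (acc.1 ++ String.ofList [c], c)) ("", '5')).1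

-- ===== PRECONDITION & SPEC =====
def Spec_part2 (inp : List String) (out : String) : Prop := out = part2_alt inp
instance (inp : List String) (out : String) : Decidable (Spec_part2 inp out) := by unfold Spec_part2; infer_instance

-- ===== CLAIM (what is proved, stated in full; the proofs are below) =====
def Claim_equal_part2 : Prop := ∀ (inp : List String), Dom_part2 inp → Spec_part2 inp (part2 inp)

-- ===== LEMMAS AND PROOFS =====

-- the 13 reachable states of A paired with the corresponding key of B
def pvPairs : List ((Int × Int) × Char) :=
  [((2,0),'1'), ((1,1),'2'), ((2,1),'3'), ((3,1),'4'),
   ((0,2),'5'), ((1,2),'6'), ((2,2),'7'), ((3,2),'8'), ((4,2),'9'),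
   ((1,3),'A'), ((2,3),'B'), ((3,3),'C'), ((2,4),'D')]

lemma pv_step_mem (p : (Int × Int) × Char) (hp : p ∈ pvPairs) (c : Char) :
    (pvStepA p.1 c, pvStepB p.2 c) ∈ pvPairs := by
  by_cases hU : c = 'U'
  · subst hU; fin_cases hp <;> decide
  by_cases hL : c = 'L'
  · subst hL; fin_cases hp <;> decide
  by_cases hR : c = 'R'
  · subst hR; fin_cases hp <;> decide
  by_cases hD : c = 'D'
  · subst hD; fin_cases hp <;> decide
  have hU' : ('U' == c) = false := by simp [Ne.symm hU]
  have hL' : ('L' == c) = false := by simp [Ne.symm hL]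
  have hR' : ('R' == c) = false := by simp [Ne.symm hR]
  have hD' : ('D' == c) = false := by simp [Ne.symm hD]
  fin_cases hp <;>
    simp_all [pvStepA, pvStepB, pvPairs, pvTrans, PySem.Dict.get?]

lemma pv_fold_mem (cs : List Char) (p : (Int × Int) × Char) (hp : p ∈ pvPairs) :
    (cs.foldl pvStepA p.1, cs.foldl pvStepB p.2) ∈ pvPairs := by
  induction cs generalizing p with
  | nil => simpa using hp
  | cons c cs ih =>
    simpa using ih (pvStepA p.1 c, pvStepB p.2 c) (pv_step_mem p hp c)

lemma pv_val (p : (Int × Int) × Char) (hp : p ∈ pvPairs) :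
    pvAt p.1.1 p.1.2 = String.ofList [p.2] := by
  fin_cases hp <;> rfl

lemma pv_main (lines : List String) (a : String) (p : (Int × Int) × Char)
    (hp : p ∈ pvPairs) :
    (lines.foldl (fun acc line =>
        let st := line.toList.foldl pvStepA acc.2
        (acc.1 ++ pvAt st.1 st.2, st)) (a, p.1)).1
      = (lines.foldl (fun acc line =>
        let c := line.toList.foldl pvStepB acc.2
        (acc.1 ++ String.ofList [c], c)) (a, p.2)).1 := by
  induction lines generalizing a p with
  | nil => rfl
  | cons line rest ih =>
    have hq := pv_fold_mem line.toList p hp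
    have hv := pv_val _ hq
    simp only [List.foldl]
    rw [show pvAt (line.toList.foldl pvStepA p.1).1 (line.toList.foldl pvStepA p.1).2
          = String.ofList [line.toList.foldl pvStepB p.2] from hv]
    exact ih (a ++ String.ofList [line.toList.foldl pvStepB p.2]) _ hq

-- ===== VERDICT (by name: the statement is the Claim_ definition above) =====
theorem part2_spec : Claim_equal_part2 := by
  intro inp _
  show part2 inp = part2_alt inp
  exact pv_main inp "" ((0, 2), '5') (by decide)
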